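-- pv_equiv track=rewrite | github.com/VladislavJevremovic/Coding-Problem-Solutions | LeetCode/python/0819 Most Common Word.py | mostCommonWord
-- ===== SOURCE A (Python) =====
-- import collections
-- from typing import List
--
-- def mostCommonWord(paragraph: str, banned: List[str]) -> str:
--     banned_set = set(banned)
--     for ps in "!?',;.":
--         paragraph = paragraph.replace(ps, " ")
--     paragraph_words = [word for word in paragraph.lower().split()]
--     word_counts = collections.Counter(paragraph_words)
--
--     most_frequent_word = ''
--     highest_frequency = 0
--     for word, word_count in word_counts.items():
--         if word_count > highest_frequency and word not in banned_set:
--             most_frequent_word = word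
--             highest_frequency = word_count
--
--     return most_frequent_word
-- ===== SOURCE B (Python) =====
-- import collections
--
--
-- def mostCommonWord(paragraph, banned):
--     banned_set = set(banned)
--     for ps in "!?',;.":
--         paragraph = paragraph.replace(ps, " ")
--     counts = collections.Counter(paragraph.lower().split())
--     for word, _ in counts.most_common():
--         if word not in banned_set:
--             return word
--     return ''
-- ===== Notes on version B (the rewrite author's own statement) =====
-- stated objective: idiomatic
-- what changed: B replaces A's manual running-max over unordered Counter items with Counter.most_common() (stable sort by descending frequency) followed by a single scan returning the first non-banned word.
import Mathlib
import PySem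

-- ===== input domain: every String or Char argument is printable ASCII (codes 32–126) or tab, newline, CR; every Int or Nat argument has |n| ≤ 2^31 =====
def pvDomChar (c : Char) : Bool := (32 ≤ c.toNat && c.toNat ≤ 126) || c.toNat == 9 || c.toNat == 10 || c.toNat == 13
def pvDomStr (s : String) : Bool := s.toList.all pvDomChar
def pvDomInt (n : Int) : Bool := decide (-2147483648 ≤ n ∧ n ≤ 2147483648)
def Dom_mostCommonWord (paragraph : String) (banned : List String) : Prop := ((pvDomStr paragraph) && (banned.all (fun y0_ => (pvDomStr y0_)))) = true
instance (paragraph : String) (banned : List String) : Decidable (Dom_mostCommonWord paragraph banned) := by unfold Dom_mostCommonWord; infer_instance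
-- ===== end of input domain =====

-- B: instead of A's manual running-max over unordered Counter items, B orders the counts
-- (Counter.most_common(), a stable descending sort) and returns the first non-banned word (idiomatic).


-- ===== PORT A =====
def mostCommonWord (paragraph : String) (banned : List String) : String :=
  let bannedSet : PySem.Set String := PySem.Set.ofList banned
  let paragraph := ("!?',;.".toList).foldl
    (fun s ps => PySem.Str.replace s (String.ofList [ps]) " ") paragraph
  let paragraphWords := PySem.Str.split₀ (PySem.Str.lower paragraph)
  let wordCounts := PySem.Dict.counter paragraphWords
  -- the running-max loop over word_counts.items(), '' / 0 to start
  let r := wordCounts.items.foldl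
    (fun (acc : String × Int) kv =>
      if decide (acc.2 < kv.2) && !(PySem.Set.contains bannedSet kv.1) then kv else acc)
    ("", 0)
  r.1

-- ===== PORT B =====
-- B's for-loop with early return: first word of the list that is not banned, '' if none
def pvFirstAllowed (bannedSet : PySem.Set String) : List (String × Int) → String
  | [] => ""
  | kv :: rest =>
      if !(PySem.Set.contains bannedSet kv.1) then kv.1 else pvFirstAllowed bannedSet rest

def mostCommonWord_alt (paragraph : String) (banned : List String) : String :=
  let bannedSet : PySem.Set String := PySem.Set.ofList banned
  let paragraph := ("!?',;.".toList).foldl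
    (fun s ps => PySem.Str.replace s (String.ofList [ps]) " ") paragraph
  let counts := PySem.Dict.counter (PySem.Str.split₀ (PySem.Str.lower paragraph))
  -- counts.most_common() = stable sort of counts.items() by descending count
  pvFirstAllowed bannedSet (PySem.List.sorted counts.items (fun kv => kv.2) true)

-- ===== PRECONDITION & SPEC =====
def Spec_mostCommonWord (paragraph : String) (banned : List String) (out : String) : Prop := out = mostCommonWord_alt paragraph banned
instance (paragraph : String) (banned : List String) (out : String) : Decidable (Spec_mostCommonWord paragraph banned out) := by unfold Spec_mostCommonWord; infer_instance

-- ===== CLAIM (what is proved, stated in full; the proofs are below) =====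
def Claim_equal_mostCommonWord : Prop := ∀ (paragraph : String) (banned : List String), Dom_mostCommonWord paragraph banned → Spec_mostCommonWord paragraph banned (mostCommonWord paragraph banned)

-- ===== LEMMAS AND PROOFS =====

-- B's early-return scan is head? of the filtered list
theorem pvFirstAllowed_eq_head (bannedSet : PySem.Set String) (l : List (String × Int)) :
    pvFirstAllowed bannedSet l =
      (((l.filter (fun kv => !(PySem.Set.contains bannedSet kv.1))).head?).map Prod.fst).getD "" := by
  induction l with
  | nil => rfl
  | cons kv rest ih =>
      rw [pvFirstAllowed, List.filter_cons]
      cases h : PySem.Set.contains bannedSet kv.1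
      · simp only [Bool.not_false, if_pos, List.head?_cons, Option.map_some, Option.getD_some]
      · simp only [Bool.not_true, Bool.false_eq_true, if_false, ih]

-- A's fold, with the membership test folded in, is the plain running-max fold over the filtered list
theorem pvFoldl_filter (p : String × Int → Bool) (l : List (String × Int)) (z : String × Int) :
    l.foldl (fun acc kv => if decide (acc.2 < kv.2) && p kv then kv else acc) z =
      (l.filter p).foldl (fun acc kv => if decide (acc.2 < kv.2) then kv else acc) z := by
  induction l generalizing z with
  | nil => rfl
  | cons kv rest ih =>
      rw [List.foldl_cons, List.filter_cons]
      cases h : p kv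
      · simp only [Bool.and_false, Bool.false_eq_true, if_false, ih]
      · simp only [Bool.and_true, if_true, List.foldl_cons, ih]

-- filtering commutes with inserting into a descending-sorted list
theorem pvFilter_insertBy (key : String × Int → Int) (p : String × Int → Bool)
    (x : String × Int) (ys : List (String × Int))
    (hys : ys.Pairwise (fun a b => key b ≤ key a)) :
    (PySem.List.insertBy (fun a b => decide (key b < key a)) x ys).filter p =
      if p x then PySem.List.insertBy (fun a b => decide (key b < key a)) x (ys.filter p)
      else ys.filter p := by
  induction ys with
  | nil =>
      cases hx : p x
      · simp [PySem.List.insertBy, hx]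
      · simp [PySem.List.insertBy, hx]
  | cons y t ih =>
      have ht : t.Pairwise (fun a b => key b ≤ key a) := (List.pairwise_cons.mp hys).2
      have hyt : ∀ z ∈ t, key z ≤ key y := (List.pairwise_cons.mp hys).1
      rw [PySem.List.insertBy]
      by_cases hb : key y < key x
      · rw [if_pos (by simpa using hb)]
        cases hx : p x
        · rw [List.filter_cons, List.filter_cons]
          simp only [hx, Bool.false_eq_true, if_false]
        · rw [List.filter_cons, List.filter_cons]
          simp only [hx, if_true]
          cases hy : p y
          · simp only [Bool.false_eq_true, if_false]
            cases hft : t.filter p with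
            | nil => simp [PySem.List.insertBy]
            | cons w ws =>
                have hw : w ∈ t := List.mem_of_mem_filter (hft ▸ List.mem_cons_self ..)
                rw [PySem.List.insertBy, if_pos (by simpa using lt_of_le_of_lt (hyt _ hw) hb)]
          · simp only [if_true]
            rw [PySem.List.insertBy, if_pos (by simpa using hb)]
      · rw [if_neg (by simpa using hb)]
        rw [List.filter_cons, List.filter_cons, ih ht]
        cases hx : p x
        · simp only [Bool.false_eq_true, if_false]
        · simp only [if_true]
          cases hy : p y
          · simp only [Bool.false_eq_true, if_false]
          · simp only [if_true]
            rw [PySem.List.insertBy, if_neg (by simpa using hb)]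

-- hence filtering commutes with the whole stable descending sort
theorem pvFilter_sorted (key : String × Int → Int) (p : String × Int → Bool)
    (l : List (String × Int)) :
    (PySem.List.sorted l key true).filter p = PySem.List.sorted (l.filter p) key true := by
  induction l using List.reverseRecOn with
  | nil => rfl
  | append_singleton l x ih =>
      rw [PySem.List.sorted_rev_eq_foldl_insertBy (l ++ [x]), List.foldl_append,
          List.foldl_cons, List.foldl_nil, ← PySem.List.sorted_rev_eq_foldl_insertBy,
          pvFilter_insertBy key p x _ (PySem.List.sorted_pairwise_rev l key), ih,
          List.filter_append]
      cases hx : p x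
      · simp only [Bool.false_eq_true, if_false, List.filter_cons, hx, List.filter_nil,
          List.append_nil]
      · simp only [if_true, List.filter_cons, hx, List.filter_nil]
        rw [PySem.List.sorted_rev_eq_foldl_insertBy (l.filter p ++ [x]), List.foldl_append,
            List.foldl_cons, List.foldl_nil, ← PySem.List.sorted_rev_eq_foldl_insertBy]

-- the running max (strict '>', first wins) over positive counts is the head of the stable descending sort
theorem pvFoldl_max_eq_head (m : List (String × Int)) (hpos : ∀ kv ∈ m, 0 < kv.2) :
    m.foldl (fun acc kv => if decide (acc.2 < kv.2) then kv else acc) ("", 0) =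
      ((PySem.List.sorted m (fun kv => kv.2) true).head?).getD ("", 0) := by
  induction m using List.reverseRecOn with
  | nil => rfl
  | append_singleton l x ih =>
      have hl : ∀ kv ∈ l, 0 < kv.2 := fun kv h => hpos kv (by simp [h])
      have hx : 0 < x.2 := hpos x (by simp)
      rw [List.foldl_append, List.foldl_cons, List.foldl_nil, ih hl]
      rw [PySem.List.sorted_rev_eq_foldl_insertBy (l ++ [x]), List.foldl_append,
          List.foldl_cons, List.foldl_nil, ← PySem.List.sorted_rev_eq_foldl_insertBy]
      cases hs : PySem.List.sorted l (fun kv => kv.2) true with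
      | nil => simp [PySem.List.insertBy, hx]
      | cons y t =>
          rw [PySem.List.insertBy]
          by_cases hb : y.2 < x.2 <;> simp [hb]

-- the two selection strategies agree on any Counter(ws) (all counts are ≥ 1 there)
theorem pvKey (bannedSet : PySem.Set String) (ws : List String) :
    (((PySem.Dict.counter ws).items).foldl
      (fun (acc : String × Int) kv =>
        if decide (acc.2 < kv.2) && !(PySem.Set.contains bannedSet kv.1) then kv else acc)
      ("", 0)).1
    = pvFirstAllowed bannedSet
        (PySem.List.sorted (PySem.Dict.counter ws).items (fun kv => kv.2) true) := by
  set items := (PySem.Dict.counter ws).items with hitems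
  have hpos : ∀ kv ∈ items, 0 < kv.2 := by
    intro kv hkv
    rw [hitems, PySem.Dict.items_counter] at hkv
    rcases List.mem_map.mp hkv with ⟨k, hk, rfl⟩
    have : k ∈ ws := (PySem.Set.mem_ofList ..).mp hk
    simpa using List.count_pos_iff.mpr this
  set p : String × Int → Bool := fun kv => !(PySem.Set.contains bannedSet kv.1) with hp
  have hposf : ∀ kv ∈ items.filter p, 0 < kv.2 := fun kv h => hpos kv (List.mem_of_mem_filter h)
  rw [pvFirstAllowed_eq_head, pvFilter_sorted,
      pvFoldl_filter p items ("", 0), pvFoldl_max_eq_head _ hposf]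
  cases PySem.List.sorted (items.filter p) (fun kv => kv.2) true with
  | nil => rfl
  | cons y t => rfl

theorem mostCommonWord_eq (paragraph : String) (banned : List String) :
    mostCommonWord paragraph banned = mostCommonWord_alt paragraph banned := by
  rw [mostCommonWord, mostCommonWord_alt]
  exact pvKey _ _

-- ===== VERDICT (by name: the statement is the Claim_ definition above) =====
theorem mostCommonWord_spec : Claim_equal_mostCommonWord := by
  intro paragraph banned _
  unfold Spec_mostCommonWord
  exact mostCommonWord_eq paragraph banned
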